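-- pv_equiv track=rewrite | github.com/JustinMNIC/codewars_solutions | 6 kyu How many elephants can the spider web hold.py | break_the_web
-- ===== SOURCE A (Python) =====
-- def break_the_web(strength, width):
--     if strength < 1000 or width < 1:
--         return 0
--     else:
--         max_number_of_elephants = 0
--         for elepahnt_in_row in range(1, width+1):
--             max_number_of_elephants += elepahnt_in_row
--
--         elephants_total_weight = 0
--         elephants_wight = 1000
--         elephants = 0
--         cash_widht = width
--         cash_index = 1
--         while elephants_total_weight <= strength:
--             if max_number_of_elephants == 0:
--                 return elephants
--             if cash_widht == 0:
--                 cash_widht = width - cash_index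
--                 cash_index += 1
--                 elephants_wight += 1000
--             elephants += 1
--             elephants_total_weight += elephants_wight
--             cash_widht -= 1
--             max_number_of_elephants -= 1
--         return elephants - 1
-- ===== SOURCE B (Python) =====
-- def break_the_web(strength, width):
--     if strength < 1000 or width < 1:
--         return 0
--     count = 0
--     cum = 0
--     for r in range(1, width + 1):
--         size = width - r + 1
--         w = 1000 * r
--         row_total = size * w
--         if cum + row_total <= strength:
--             cum += row_total
--             count += size
--         else:
--             return count + (strength - cum) // w
--     return count
-- ===== Notes on version B (the rewrite author's own statement) =====
-- stated objective: faster
-- what changed: A places elephants one at a time in a while loop (one iteration per elephant, ~strength/1000 iterations); B iterates once per row, adding a whole row's weight at a time and computing the partially filled critical row in closed form with floor division.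
import Mathlib
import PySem

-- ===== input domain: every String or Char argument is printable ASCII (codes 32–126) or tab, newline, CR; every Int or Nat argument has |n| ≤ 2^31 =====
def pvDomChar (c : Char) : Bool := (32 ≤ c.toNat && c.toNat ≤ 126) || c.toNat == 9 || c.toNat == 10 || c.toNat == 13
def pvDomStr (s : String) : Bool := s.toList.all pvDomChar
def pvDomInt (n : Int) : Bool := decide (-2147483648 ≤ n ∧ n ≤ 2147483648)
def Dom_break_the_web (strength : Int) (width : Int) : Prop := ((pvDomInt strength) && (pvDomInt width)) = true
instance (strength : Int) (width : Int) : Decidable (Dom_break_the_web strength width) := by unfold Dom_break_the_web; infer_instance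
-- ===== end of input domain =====

-- B replaces A's elephant-by-elephant while loop by a per-row loop with a closed-form
-- floor-division for the partially filled last row (objective: faster).

-- ===== PORT A =====
-- A's while loop; its counter max_number_of_elephants is the computed triangular number
-- (non-negative) and decreases by exactly 1 per iteration, so it is carried as the Nat
-- recursion argument; all other state is carried unchanged.
def webLoop (strength width : Int) (etw ew el cw ci : Int) : Nat → Int
  | 0 => if etw ≤ strength then el else el - 1          -- while-test, then 'max == 0 → return elephants'
  | n + 1 =>
    if etw ≤ strength then
      if cw = 0 then
        let ew' := ew + 1000
        webLoop strength width (etw + ew') ew' (el + 1) ((width - ci) - 1) (ci + 1) n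
      else
        webLoop strength width (etw + ew) ew (el + 1) (cw - 1) ci n
    else el - 1

def break_the_web (strength : Int) (width : Int) : Int :=
  if strength < 1000 ∨ width < 1 then 0
  else
    webLoop strength width 0 1000 0 width 1
      ((PySem.List.pyRange 1 (width + 1) 1).foldl (· + ·) 0).toNat

-- ===== PORT B =====
def altGo (strength width : Int) : List Int → Int → Int → Int
  | [], count, _cum => count
  | r :: rs, count, cum =>
    let size := width - r + 1
    let w := 1000 * r
    let rowTotal := size * w
    if cum + rowTotal ≤ strength then
      altGo strength width rs (count + size) (cum + rowTotal)
    else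
      count + PySem.Int.floordiv (strength - cum) w

def break_the_web_alt (strength : Int) (width : Int) : Int :=
  if strength < 1000 ∨ width < 1 then 0
  else altGo strength width (PySem.List.pyRange 1 (width + 1) 1) 0 0

-- ===== PRECONDITION & SPEC =====
def Spec_break_the_web (strength : Int) (width : Int) (out : Int) : Prop := out = break_the_web_alt strength width
instance (strength : Int) (width : Int) (out : Int) : Decidable (Spec_break_the_web strength width out) := by unfold Spec_break_the_web; infer_instance

-- ===== CLAIM (what is proved, stated in full; the proofs are below) =====
def Claim_equal_break_the_web : Prop := ∀ (strength : Int) (width : Int), Dom_break_the_web strength width → Spec_break_the_web strength width (break_the_web strength width)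

-- ===== LEMMAS AND PROOFS =====

-- reference evaluator: one elephant (of weight w) at a time
def pvRun (strength : Int) : List Int → Int → Int → Int
  | [], cum, count => if cum ≤ strength then count else count - 1
  | w :: ws, cum, count => if cum ≤ strength then pvRun strength ws (cum + w) (count + 1) else count - 1

-- weights of the last d rows of a width-W web (rows W+1-d .. W), flattened
def pvRowsD (W : Nat) : Nat → List Int
  | 0 => []
  | d + 1 => List.replicate (d + 1) (1000 * ((W - d : Nat) : Int)) ++ pvRowsD W d

def pvTri : Nat → Nat
  | 0 => 0
  | n + 1 => pvTri n + (n + 1)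

theorem len_pvRowsD (W d : Nat) : (pvRowsD W d).length = pvTri d := by
  induction d with
  | zero => rfl
  | succ d ih => simp [pvRowsD, pvTri, ih]; omega

theorem pvRun_gt (strength : Int) (l : List Int) (cum count : Int) (h : strength < cum) :
    pvRun strength l cum count = count - 1 := by
  cases l <;> simp [pvRun, not_le.mpr h]

theorem A_inv (strength : Int) (W : Nat) :
    ∀ (n : Nat) (r c : Nat) (etw el : Int), 1 ≤ r → r ≤ W → c ≤ W - r + 1 →
      n = c + (pvRowsD W (W - r)).length →
      webLoop strength (W : Int) etw (1000 * (r : Int)) el (c : Int) (r : Int) n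
        = pvRun strength (List.replicate c (1000 * (r : Int)) ++ pvRowsD W (W - r)) etw el := by
  intro n
  induction n with
  | zero =>
    intro r c etw el _ _ _ hn
    have hc : c = 0 := by omega
    have hl : (pvRowsD W (W - r)).length = 0 := by omega
    have : pvRowsD W (W - r) = [] := List.length_eq_zero_iff.mp hl
    simp [webLoop, pvRun, hc, this]
  | succ n ih =>
    intro r c etw el hr1 hrW hc hn
    by_cases hle : etw ≤ strength
    · rcases Nat.eq_zero_or_pos c with hc0 | hcpos
      · -- row exhausted: advance to row r+1
        subst hc0
        have hlen : (pvRowsD W (W - r)).length = n + 1 := by omega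
        have hrlt : r < W := by
          by_contra h
          have : W - r = 0 := by omega
          simp [this, pvRowsD] at hlen
        have hd : W - r = (W - r - 1) + 1 := by omega
        have hrow : pvRowsD W (W - r)
            = List.replicate (W - r) (1000 * ((r + 1 : Nat) : Int)) ++ pvRowsD W (W - r - 1) := by
          rw [hd]
          have : W - (W - r - 1) = r + 1 := by omega
          simp [pvRowsD, this]
        have e1 : ((1000 : Int) * (r : Int) + 1000) = 1000 * ((r + 1 : Nat) : Int) := by push_cast; ring
        have e2 : ((W : Int) - (r : Int)) - 1 = ((W - r - 1 : Nat) : Int) := by omega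
        have e3 : ((r : Int) + 1) = ((r + 1 : Nat) : Int) := by omega
        have hWr1 : W - (r + 1) = W - r - 1 := by omega
        have hlenA := len_pvRowsD W (W - r)
        have hlenB := len_pvRowsD W (W - r - 1)
        have ht : pvTri (W - r) = pvTri (W - r - 1) + (W - r) := by
          conv_lhs => rw [hd]
          simp [pvTri]
          omega
        have hcall := ih (r + 1) (W - r - 1) (etw + 1000 * ((r + 1 : Nat) : Int)) (el + 1)
          (by omega) (by omega) (by omega) (by rw [hWr1, hlenB]; omega)
        rw [hWr1] at hcall
        show (if etw ≤ strength then _ else el - 1) = _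
        rw [if_pos hle]
        simp only [Nat.cast_zero, reduceIte]
        rw [e1, e2, e3, hcall, hrow]
        have hWrsucc : W - r = (W - r - 1) + 1 := hd
        rw [hWrsucc, List.replicate_succ]
        simp [pvRun, hle]
      · -- step inside the current row
        obtain ⟨c', rfl⟩ : ∃ c', c = c' + 1 := ⟨c - 1, by omega⟩
        have hne : ((c' + 1 : Nat) : Int) ≠ 0 := by omega
        have e2 : ((c' + 1 : Nat) : Int) - 1 = ((c' : Nat) : Int) := by omega
        have hcall := ih r c' (etw + 1000 * (r : Int)) (el + 1) hr1 hrW (by omega) (by omega)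
        show (if etw ≤ strength then _ else el - 1) = _
        rw [if_pos hle, if_neg hne, e2, hcall]
        rw [List.replicate_succ]
        simp [pvRun, hle]
    · show (if etw ≤ strength then _ else el - 1) = _
      rw [if_neg hle, pvRun_gt strength _ etw el (by omega)]

-- run over a full row that fits entirely
theorem pvRun_replicate_fits (strength w : Int) (hw : 0 ≤ w) :
    ∀ (k : Nat) (cum count : Int) (ws : List Int), cum + (k : Int) * w ≤ strength →
      pvRun strength (List.replicate k w ++ ws) cum count
        = pvRun strength ws (cum + (k : Int) * w) (count + (k : Int)) := by
  intro k
  induction k with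
  | zero => intro cum count ws h; simp
  | succ k ih =>
    intro cum count ws h
    have hk : (0 : Int) ≤ (k : Int) * w := by positivity
    have hle : cum ≤ strength := by push_cast at h; nlinarith
    rw [List.replicate_succ, List.cons_append]
    simp only [pvRun]
    rw [if_pos hle, ih (cum + w) (count + 1) ws (by push_cast at h ⊢; nlinarith)]
    congr 1 <;> push_cast <;> ring

-- run over a row that does not fit entirely: floor division counts the survivors
theorem pvRun_replicate_over (strength w : Int) (hw : 0 < w) :
    ∀ (k : Nat) (cum count : Int) (ws : List Int), cum ≤ strength →
      strength < cum + (k : Int) * w →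
      pvRun strength (List.replicate k w ++ ws) cum count
        = count + PySem.Int.floordiv (strength - cum) w := by
  intro k
  induction k with
  | zero => intro cum count ws h1 h2; simp at h2; omega
  | succ k ih =>
    intro cum count ws h1 h2
    rw [List.replicate_succ, List.cons_append]
    simp only [pvRun]
    rw [if_pos h1]
    by_cases hnext : cum + w ≤ strength
    · rw [ih (cum + w) (count + 1) ws hnext (by push_cast at h2 ⊢; nlinarith)]
      have hq := (PySem.Int.floordiv_eq_iff_of_pos hw).mp
        (rfl : PySem.Int.floordiv (strength - (cum + w)) w = _)
      have : PySem.Int.floordiv (strength - cum) w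
          = PySem.Int.floordiv (strength - (cum + w)) w + 1 := by
        apply (PySem.Int.floordiv_eq_iff_of_pos hw).mpr
        constructor <;> nlinarith [hq.1, hq.2]
      rw [this]; ring
    · rw [not_le] at hnext
      rw [pvRun_gt strength _ (cum + w) (count + 1) hnext]
      have : PySem.Int.floordiv (strength - cum) w = 0 := by
        apply (PySem.Int.floordiv_eq_iff_of_pos hw).mpr
        constructor <;> nlinarith
      rw [this]; ring

theorem B_inv (strength : Int) (W : Nat) :
    ∀ (d : Nat) (r : Nat) (count cum : Int), W + 1 - r = d → 1 ≤ r → cum ≤ strength →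
      altGo strength (W : Int) (PySem.List.pyRange (r : Int) ((W : Int) + 1) 1) count cum
        = pvRun strength (pvRowsD W (W + 1 - r)) cum count := by
  intro d
  induction d with
  | zero =>
    intro r count cum hd hr hcum
    have hempty : PySem.List.pyRange (r : Int) ((W : Int) + 1) 1 = [] := by
      rw [PySem.List.pyRange_one]
      have : (((W : Int) + 1) - (r : Int)).toNat = 0 := by omega
      simp [this]
    rw [hempty, hd]
    simp [altGo, pvRowsD, pvRun, hcum]
  | succ d ih =>
    intro r count cum hd hr hcum
    have hrW : r ≤ W := by omega
    have hcons : PySem.List.pyRange (r : Int) ((W : Int) + 1) 1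
        = (r : Int) :: PySem.List.pyRange ((r : Int) + 1) ((W : Int) + 1) 1 :=
      PySem.List.pyRange_one_cons (by omega)
    rw [hcons]
    have hrow : pvRowsD W (W + 1 - r)
        = List.replicate (W - r + 1) (1000 * (r : Int)) ++ pvRowsD W (W - r) := by
      have h1 : W + 1 - r = (W - r) + 1 := by omega
      have h2 : W - (W - r) = r := by omega
      rw [h1]
      simp [pvRowsD, h2]
    have hsz : ((W : Int) - (r : Int) + 1) = ((W - r + 1 : Nat) : Int) := by omega
    have hwpos : (0 : Int) < 1000 * (r : Int) := by positivity
    show (if cum + ((W : Int) - (r : Int) + 1) * (1000 * (r : Int)) ≤ strength then _ else _) = _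
    by_cases hfit : cum + ((W : Int) - (r : Int) + 1) * (1000 * (r : Int)) ≤ strength
    · rw [if_pos hfit]
      have e3 : ((r : Int) + 1) = ((r + 1 : Nat) : Int) := by omega
      rw [e3]
      have hcall := ih (r + 1) (count + ((W : Int) - (r : Int) + 1))
        (cum + ((W : Int) - (r : Int) + 1) * (1000 * (r : Int))) (by omega) (by omega) hfit
      rw [hcall, hrow,
        pvRun_replicate_fits strength (1000 * (r : Int)) (by positivity) (W - r + 1) cum count
          (pvRowsD W (W - r)) (by rw [← hsz]; exact hfit)]
      have hWr : W + 1 - (r + 1) = W - r := by omega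
      rw [hWr, ← hsz]
    · rw [if_neg hfit]
      rw [not_le] at hfit
      rw [hrow, pvRun_replicate_over strength (1000 * (r : Int)) hwpos (W - r + 1) cum count
        (pvRowsD W (W - r)) hcum (by rw [← hsz]; exact hfit)]

theorem foldl_range_sum (m : Nat) :
    ∀ a : Int, List.foldl (· + ·) a ((List.range m).map (fun k : Nat => 1 + (k : Int))) = a + (pvTri m : Int) := by
  induction m with
  | zero => intro a; simp [pvTri]
  | succ m ih =>
    intro a
    rw [List.range_succ, List.map_append, List.foldl_append, ih]
    simp only [List.map_cons, List.map_nil, List.foldl_cons, List.foldl_nil, pvTri]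
    push_cast
    ring

-- ===== VERDICT (by name: the statement is the Claim_ definition above) =====
theorem break_the_web_spec : Claim_equal_break_the_web := by
  intro strength width _
  unfold Spec_break_the_web break_the_web break_the_web_alt
  by_cases htriv : strength < 1000 ∨ width < 1
  · rw [if_pos htriv, if_pos htriv]
  · rw [if_neg htriv, if_neg htriv]
    rw [not_or, not_lt, not_lt] at htriv
    obtain ⟨hs, hw⟩ := htriv
    obtain ⟨W, rfl⟩ : ∃ W : Nat, width = (W : Int) :=
      ⟨width.toNat, (Int.toNat_of_nonneg (by omega)).symm⟩
    have hW1 : 1 ≤ W := by omega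
    -- the foldl computes the triangular number
    have hrange : PySem.List.pyRange 1 ((W : Int) + 1) 1
        = (List.range W).map (fun k : Nat => 1 + (k : Int)) := by
      have ht : (((W : Int) + 1) - 1).toNat = W := by omega
      rw [PySem.List.pyRange_one, ht]
    have hfold : (PySem.List.pyRange 1 ((W : Int) + 1) 1).foldl (· + ·) 0 = (pvTri W : Int) := by
      rw [hrange, foldl_range_sum W 0]; ring
    rw [hfold, Int.toNat_natCast]
    -- A side
    have hA := A_inv strength W (pvTri W) 1 W 0 0 le_rfl hW1 (by omega)
      (by rw [len_pvRowsD]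
          conv_lhs => rw [show W = (W - 1) + 1 from by omega]
          simp [pvTri]
          omega)
    simp only [Nat.cast_one, mul_one] at hA
    -- B side
    have hB := B_inv strength W W 1 0 0 (by omega) le_rfl (by omega)
    simp only [Nat.cast_one] at hB
    rw [show W + 1 - 1 = W from by omega] at hB
    -- the full weight list is row 1 followed by the remaining rows
    have hlist : pvRowsD W W = List.replicate W (1000 : Int) ++ pvRowsD W (W - 1) := by
      obtain ⟨V, rfl⟩ : ∃ V, W = V + 1 := ⟨W - 1, by omega⟩
      simp [pvRowsD]
    rw [hB, hlist, hA]
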